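-- pv_equiv track=rewrite | github.com/Afhrodite/ASL-Hand-Tracking-Translator | src/run_asl_models_on_videos.py | remove_noise
-- ===== SOURCE A (Python) =====
-- MIN_STABLE_FRAMES = 3
--
-- def remove_noise(preds, min_stable=MIN_STABLE_FRAMES):
--     """
--     Removes noisy predictions by keeping letters only if they
--     appear consecutively for a minimum number of frames.
--     """
--     cleaned = []
--     count = 0
--     prev = None
--
--     for p in preds:
--         if p == prev:
--             count += 1
--         else:
--             count = 1
--             prev = p
--
--         if count == min_stable:
--             cleaned.append(p)
--
--     return cleaned
-- ===== SOURCE B (Python) =====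
-- MIN_STABLE_FRAMES = 3
--
-- def remove_noise(preds, min_stable=MIN_STABLE_FRAMES):
--     """
--     Removes noisy predictions by keeping letters only if they
--     appear consecutively for a minimum number of frames.
--
--     A frame i is kept when the last min_stable frames ending at i all
--     show one and the same letter and the frame just before that window
--     (if there is one) shows a different letter.
--     """
--     n = min_stable
--     return [p for i, p in enumerate(preds)
--             if i + 1 >= n
--             and len(set(preds[i - n + 1 : i + 1])) == 1
--             and (i + 1 == n or preds[i - n] != p)]
-- ===== Notes on version B (the rewrite author's own statement) =====
-- stated objective: alternative
-- what changed: Replaces A's streaming run-length counter (count/prev state, emit when count hits min_stable) by a stateless per-position window test: position i is kept iff the last min_stable frames ending at i are one constant letter and the frame just before that window differs; no counter or run state is carried between positions.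
import Mathlib
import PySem

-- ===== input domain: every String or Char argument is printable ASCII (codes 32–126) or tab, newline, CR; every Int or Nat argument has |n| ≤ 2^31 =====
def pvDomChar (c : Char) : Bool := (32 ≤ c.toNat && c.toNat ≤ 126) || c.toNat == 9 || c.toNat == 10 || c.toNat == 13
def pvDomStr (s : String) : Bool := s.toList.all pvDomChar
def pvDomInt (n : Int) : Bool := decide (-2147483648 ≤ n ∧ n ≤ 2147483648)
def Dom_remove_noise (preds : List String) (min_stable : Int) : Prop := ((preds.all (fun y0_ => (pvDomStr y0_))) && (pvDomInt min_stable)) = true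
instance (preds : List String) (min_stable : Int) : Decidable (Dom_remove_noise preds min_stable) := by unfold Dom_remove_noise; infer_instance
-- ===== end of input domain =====

-- B replaces A's streaming run-length counter by a stateless per-position window
-- test: keep frame i iff the last min_stable frames ending at i are one constant
-- letter and the frame just before that window (if any) differs.

-- ===== PORT A =====
-- literal transliteration of A's loop: state (cleaned, count, prev)
def remove_noise (preds : List String) (min_stable : Int) : List String :=
  (preds.foldl
    (fun (s : List String × Int × Option String) p =>
      let cleaned := s.1
      let (count, prev) :=
        if some p = s.2.2 then (s.2.1 + 1, s.2.2) else ((1 : Int), some p)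
      let cleaned := if count = min_stable then cleaned ++ [p] else cleaned
      (cleaned, count, prev))
    ([], 0, none)).1

-- ===== PORT B =====
-- B's comprehension condition (written once, used in the comprehension below):
-- i + 1 >= n  and  len(set(preds[i-n+1:i+1])) == 1  and  (i + 1 == n or preds[i-n] != p)
abbrev BCond (L : List String) (n : Int) (i : Int) (p : String) : Prop :=
  i + 1 ≥ n ∧
  PySem.Set.len (PySem.Set.ofList (PySem.List.slice L (some (i - n + 1)) (some (i + 1)))) = 1 ∧
  (i + 1 = n ∨ ¬ PySem.List.pyGet? L (i - n) = some p)

def remove_noise_alt (preds : List String) (min_stable : Int) : List String :=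
  (PySem.List.enumerate preds).filterMap (fun ip =>
    if BCond preds min_stable ip.1 ip.2 then some ip.2 else none)

-- ===== PRECONDITION & SPEC =====
def Spec_remove_noise (preds : List String) (min_stable : Int) (out : List String) : Prop := out = remove_noise_alt preds min_stable
instance (preds : List String) (min_stable : Int) (out : List String) : Decidable (Spec_remove_noise preds min_stable out) := by unfold Spec_remove_noise; infer_instance

-- ===== CLAIM (what is proved, stated in full; the proofs are below) =====
def Claim_equal_remove_noise : Prop := ∀ (preds : List String) (min_stable : Int), Dom_remove_noise preds min_stable → Spec_remove_noise preds min_stable (remove_noise preds min_stable)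

-- ===== LEMMAS AND PROOFS =====

-- ---- A-side machinery: the emitted suffix of A's loop as a function of (count, prev) ----
def gA (m : Int) : List String → Int → Option String → List String
  | [], _, _ => []
  | p :: rest, count, prev =>
    let s := if some p = prev then (count + 1, prev) else ((1 : Int), some p)
    (if s.1 = m then [p] else []) ++ gA m rest s.1 s.2

theorem foldA_eq_append_gA (m : Int) (xs : List String) :
    ∀ (cl : List String) (count : Int) (prev : Option String),
    (xs.foldl
      (fun (s : List String × Int × Option String) p =>
        let cleaned := s.1
        let (count, prev) :=
          if some p = s.2.2 then (s.2.1 + 1, s.2.2) else ((1 : Int), some p)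
        let cleaned := if count = m then cleaned ++ [p] else cleaned
        (cleaned, count, prev))
      (cl, count, prev)).1 = cl ++ gA m xs count prev := by
  induction xs with
  | nil => intro cl count prev; simp [gA]
  | cons p rest ih =>
    intro cl count prev
    simp only [List.foldl_cons]
    rw [ih]
    simp only [gA]
    by_cases h : some p = prev <;>
      simp only [h, if_pos] <;>
      split_ifs <;> simp

-- a fresh start ignores count and prev when the head differs from prev (or xs = [])
theorem gA_fresh (m : Int) (xs : List String) (count : Int) (x : String)
    (h : ∀ y ∈ xs.head?, y ≠ x) :
    gA m xs count (some x) = gA m xs 0 none := by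
  cases xs with
  | nil => rfl
  | cons y ys =>
    have hy : y ≠ x := h y rfl
    simp [gA, hy]

-- ---- run decomposition (groups of equal consecutive values), used by both sides ----
def countRun (x : String) : List String → Nat × List String
  | [] => (0, [])
  | y :: ys =>
    if y = x then
      let p := countRun x ys
      (p.1 + 1, p.2)
    else (0, y :: ys)

theorem countRun_length_le (x : String) (ys : List String) :
    (countRun x ys).2.length ≤ ys.length := by
  induction ys with
  | nil => simp [countRun]
  | cons y ys ih =>
    simp only [countRun]
    split
    · exact Nat.le_succ_of_le ih
    · exact Nat.le_refl _

def runs : List String → List (String × Nat)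
  | [] => []
  | x :: xs =>
    let p := countRun x xs
    (x, p.1 + 1) :: runs p.2
termination_by l => l.length
decreasing_by
  exact Nat.lt_succ_of_le (countRun_length_le x xs)

def runsFilter (preds : List String) (m : Int) : List String :=
  (runs preds).filterMap
    (fun kn => if 1 ≤ m ∧ m ≤ (kn.2 : Int) then some kn.1 else none)

theorem countRun_decomp (x : String) (ys : List String) :
    x :: ys = List.replicate ((countRun x ys).1 + 1) x ++ (countRun x ys).2 := by
  induction ys with
  | nil => simp [countRun]
  | cons y t ih =>
    by_cases h : y = x
    · subst h
      simp only [countRun, List.replicate_succ]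
      simpa using ih
    · simp [countRun, h]

theorem countRun_head (x : String) (ys : List String) :
    ∀ h ∈ (countRun x ys).2.head?, h ≠ x := by
  induction ys with
  | nil => simp [countRun]
  | cons y t ih =>
    by_cases h : y = x
    · subst h; simpa [countRun] using ih
    · intro z hz
      simp only [countRun, if_neg h] at hz
      simp at hz
      subst hz
      exact h

-- ---- A's emitted list over a run, and A = runsFilter ----
theorem gA_run (m : Int) (ys : List String) :
    ∀ (c : Int) (x : String),
    gA m ys c (some x) =
      (if c < m ∧ m ≤ c + ((countRun x ys).1 : Int) then [x] else []) ++
        gA m (countRun x ys).2 0 none := by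
  induction ys with
  | nil =>
    intro c x
    simp [gA, countRun]
  | cons y ys ih =>
    intro c x
    by_cases h : y = x
    · subst h
      simp only [gA, countRun, ite_true]
      rw [ih (c + 1) y]
      push_cast
      by_cases hm : c + 1 = m
      · have hc : c < m ∧ m ≤ c + (((countRun y ys).1 : Int) + 1) := by omega
        simp [hm, hc]
      · by_cases h2 : c + 1 < m ∧ m ≤ c + 1 + ((countRun y ys).1 : Int)
        · have hc : c < m ∧ m ≤ c + (((countRun y ys).1 : Int) + 1) := by omega
          simp [hm, h2, hc]
        · have hc : ¬ (c < m ∧ m ≤ c + (((countRun y ys).1 : Int) + 1)) := by omega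
          simp [hm, h2, hc]
    · simp only [countRun, if_neg h]
      have hfr : gA m (y :: ys) c (some x) = gA m (y :: ys) 0 none := by
        apply gA_fresh
        intro z hz
        simp at hz
        subst hz; exact h
      rw [hfr]
      simp

theorem gA_eq_runsFilter (preds : List String) (m : Int) :
    gA m preds 0 none = runsFilter preds m := by
  induction preds using runs.induct with
  | case1 => simp [gA, runsFilter, runs]
  | case2 x xs p ih =>
    simp only [runsFilter, runs]
    simp only [gA, List.filterMap_cons, reduceCtorEq, if_false]
    rw [gA_run m xs 1 x, ih]
    by_cases hc : 1 ≤ m ∧ m ≤ (((countRun x xs).1 + 1 : Nat) : Int)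
    · rw [if_pos hc]
      by_cases h1 : (1 : Int) = m
      · have h2 : ¬ ((1 : Int) < m ∧ m ≤ 1 + ((countRun x xs).1 : Int)) := by omega
        rw [if_pos h1, if_neg h2]
        simp only [runsFilter]; rfl
      · have h2 : (1 : Int) < m ∧ m ≤ 1 + ((countRun x xs).1 : Int) := by
          push_cast at hc; omega
        rw [if_neg h1, if_pos h2]
        simp only [runsFilter]; rfl
    · rw [if_neg hc]
      push_cast at hc
      have h1 : ¬ (1 : Int) = m := by omega
      have h2 : ¬ ((1 : Int) < m ∧ m ≤ 1 + ((countRun x xs).1 : Int)) := by omega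
      rw [if_neg h1, if_neg h2]
      simp only [runsFilter]; rfl

-- ---- B-side machinery ----
def emitB (L : List String) (n : Int) (ip : Int × String) : Option String :=
  if BCond L n ip.1 ip.2 then some ip.2 else none

theorem alt_eq_filterMap (L : List String) (m : Int) :
    remove_noise_alt L m = (PySem.List.enumerate L 0).filterMap (emitB L m) := rfl

-- len(set(l)) == 1 means: l is nonempty and all its elements are equal
theorem foldl_add_fixed (x : String) :
    ∀ (t : List String), (∀ y ∈ t, y = x) → t.foldl PySem.Set.add [x] = [x] := by
  intro t
  induction t with
  | nil => intro _; rfl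
  | cons y t ih =>
    intro h
    have hy : y = x := h y (List.mem_cons_self)
    subst hy
    have : PySem.Set.add [y] y = [y] := by
      simp [PySem.Set.add, PySem.Set.contains]
    simp only [List.foldl_cons, this]
    exact ih (fun z hz => h z (List.mem_cons_of_mem _ hz))

theorem setlen_one_iff (l : List String) :
    PySem.Set.len (PySem.Set.ofList l) = 1 ↔ ∃ x, l ≠ [] ∧ ∀ y ∈ l, y = x := by
  constructor
  · intro h
    have hlen : (PySem.Set.ofList l).length = 1 := by
      simp only [PySem.Set.len] at h
      exact_mod_cast h
    obtain ⟨x, hx⟩ := List.length_eq_one_iff.mp hlen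
    refine ⟨x, ?_, ?_⟩
    · intro hnil
      subst hnil
      simp [PySem.Set.ofList, PySem.Set.empty] at hx
    · intro y hy
      have : y ∈ PySem.Set.ofList l := (PySem.Set.mem_ofList l y).mpr hy
      rw [hx] at this
      simpa using this
  · rintro ⟨x, hne, hall⟩
    cases l with
    | nil => exact absurd rfl hne
    | cons y t =>
      have hy : y = x := hall y List.mem_cons_self
      subst hy
      have hof : PySem.Set.ofList (y :: t) = [y] := by
        rw [PySem.Set.ofList_eq_foldl]
        simp only [List.foldl_cons]
        have hadd : PySem.Set.add [] y = [y] := by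
          simp [PySem.Set.add, PySem.Set.contains]
        rw [hadd]
        exact foldl_add_fixed y t (fun z hz => hall z (List.mem_cons_of_mem _ hz))
      rw [hof]
      rfl

theorem setlen_nil_ne_one : ¬ PySem.Set.len (PySem.Set.ofList ([] : List String)) = 1 := by
  intro h
  obtain ⟨x, hne, _⟩ := (setlen_one_iff []).mp h
  exact hne rfl

-- slicing a run-headed list, in closed form
theorem sliceP (x : String) (r : Nat) (rest : List String) (a b : Nat) :
    PySem.List.slice (List.replicate r x ++ rest) (some (a : Int)) (some (b : Int)) =
      List.replicate (min (b - a) (r - a)) x ++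
        List.take ((b - a) - (r - a)) (List.drop (a - r) rest) := by
  rw [PySem.List.slice_natCast, List.drop_append, List.drop_replicate, List.take_append,
      List.take_replicate, List.length_replicate, List.length_replicate]

-- B's condition inside the leading run: it fires exactly at the min_stable-th frame
theorem emitB_rep (x : String) (r : Nat) (rest : List String) (i : Nat) (hi : i < r) (m : Int) :
    emitB (List.replicate r x ++ rest) m ((i : Int), x) =
      if (i : Int) + 1 = m then some x else none := by
  unfold emitB
  by_cases hm : (i : Int) + 1 = m
  · rw [if_pos hm]
    have hcond : BCond (List.replicate r x ++ rest) m (i : Int) x := by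
      refine ⟨by omega, ?_, Or.inl hm⟩
      have ha : (i : Int) - m + 1 = ((0 : Nat) : Int) := by omega
      have hb : (i : Int) + 1 = (((i + 1) : Nat) : Int) := by omega
      rw [ha, hb, sliceP]
      have h1 : min (i + 1 - 0) (r - 0) = i + 1 := by omega
      have h2 : (i + 1 - 0) - (r - 0) = 0 := by omega
      rw [h1, h2]
      simp only [List.take_zero, List.append_nil]
      rw [setlen_one_iff]
      exact ⟨x, by simp, fun y hy => (List.mem_replicate.mp hy).2⟩
    rw [if_pos hcond]
  · rw [if_neg hm]
    have hncond : ¬ BCond (List.replicate r x ++ rest) m (i : Int) x := by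
      rintro ⟨hg, hw, hbd⟩
      by_cases hm0 : 1 ≤ m
      · rcases hbd with h | h
        · exact hm h
        · apply h
          have hc : (i : Int) - m = (((i - m.toNat) : Nat) : Int) := by omega
          rw [hc, PySem.List.pyGet?_natCast,
              List.getElem?_append_left (by rw [List.length_replicate]; omega),
              List.getElem?_replicate, if_pos (by omega)]
      · have ha : (i : Int) - m + 1 = (((i + 1 + (-m).toNat) : Nat) : Int) := by omega
        have hb : (i : Int) + 1 = (((i + 1) : Nat) : Int) := by omega
        rw [ha, hb, sliceP] at hw
        have h1 : min ((i + 1) - (i + 1 + (-m).toNat)) (r - (i + 1 + (-m).toNat)) = 0 := by omega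
        have h2 : ((i + 1) - (i + 1 + (-m).toNat)) - (r - (i + 1 + (-m).toNat)) = 0 := by omega
        rw [h1, h2] at hw
        simp only [List.replicate_zero, List.take_zero, List.append_nil] at hw
        exact setlen_nil_ne_one hw
    rw [if_neg hncond]

-- B's condition past the leading run agrees with B's condition on the tail alone
theorem emitB_shift (x : String) (r : Nat) (hr : 1 ≤ r) (rest : List String)
    (hhead : ∀ h ∈ rest.head?, h ≠ x) (m : Int) (j : Nat) (hj : j < rest.length) :
    emitB (List.replicate r x ++ rest) m ((r : Int) + (j : Int), rest[j]) =
      emitB rest m ((j : Int), rest[j]) := by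
  have hiff : BCond (List.replicate r x ++ rest) m ((r : Int) + (j : Int)) rest[j] ↔
      BCond rest m ((j : Int)) rest[j] := by
    by_cases hm0 : 1 ≤ m
    · by_cases hloc : m ≤ (j : Int) + 1
      · -- both windows are the same slice of rest
        have haG : (r : Int) + (j : Int) - m + 1 = (((r + j + 1 - m.toNat) : Nat) : Int) := by omega
        have hbG : (r : Int) + (j : Int) + 1 = (((r + j + 1) : Nat) : Int) := by omega
        have haL : (j : Int) - m + 1 = (((j + 1 - m.toNat) : Nat) : Int) := by omega
        have hbL : (j : Int) + 1 = (((j + 1) : Nat) : Int) := by omega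
        have hslice :
            PySem.List.slice (List.replicate r x ++ rest)
              (some ((r : Int) + (j : Int) - m + 1)) (some ((r : Int) + (j : Int) + 1)) =
            PySem.List.slice rest (some ((j : Int) - m + 1)) (some ((j : Int) + 1)) := by
          rw [haG, hbG, haL, hbL, sliceP, PySem.List.slice_natCast]
          have h1 : min ((r + j + 1) - (r + j + 1 - m.toNat)) (r - (r + j + 1 - m.toNat)) = 0 := by
            omega
          have h2 : ((r + j + 1) - (r + j + 1 - m.toNat)) - (r - (r + j + 1 - m.toNat)) = m.toNat := by
            omega
          have h3 : (r + j + 1 - m.toNat) - r = j + 1 - m.toNat := by omega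
          have h4 : (j + 1) - (j + 1 - m.toNat) = m.toNat := by omega
          rw [h1, h2, h3, h4]
          simp
        constructor
        · rintro ⟨_, hw, hbd⟩
          refine ⟨by omega, by rw [← hslice]; exact hw, ?_⟩
          by_cases hjm : (j : Int) + 1 = m
          · exact Or.inl hjm
          · refine Or.inr ?_
            rcases hbd with h | h
            · omega
            · intro hc
              apply h
              have hcG : (r : Int) + (j : Int) - m = (((r + (j - m.toNat)) : Nat) : Int) := by omega
              have hcL : (j : Int) - m = (((j - m.toNat) : Nat) : Int) := by omega
              rw [hcG, PySem.List.pyGet?_natCast,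
                  List.getElem?_append_right (by rw [List.length_replicate]; omega),
                  List.length_replicate]
              rw [hcL, PySem.List.pyGet?_natCast] at hc
              have : r + (j - m.toNat) - r = j - m.toNat := by omega
              rw [this]
              exact hc
        · rintro ⟨_, hw, hbd⟩
          refine ⟨by omega, by rw [hslice]; exact hw, ?_⟩
          by_cases hjm : (j : Int) + 1 = m
          · -- the frame before the global window is the run letter x ≠ window letter
            refine Or.inr ?_
            -- the common window is take m.toNat rest, which contains rest.head and rest[j]
            obtain ⟨x0, -, hall⟩ := (setlen_one_iff _).mp hw
            -- rewrite the local window concretely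
            have haL' : (j : Int) - m + 1 = ((0 : Nat) : Int) := by omega
            have hwin :
                PySem.List.slice rest (some ((j : Int) - m + 1)) (some ((j : Int) + 1)) =
                List.take (j + 1) rest := by
              rw [haL', hbL, PySem.List.slice_natCast]
              simp
            have hwin_all : ∀ y ∈ List.take (j + 1) rest, y = x0 := by
              intro y hy
              apply hall
              rw [hwin]
              exact hy
            cases rest with
            | nil => simp at hj
            | cons h0 t =>
              have hh0 : h0 = x0 := hwin_all h0 (by simp [List.take_succ_cons])
              have hpj : (h0 :: t)[j] = x0 := by
                apply hwin_all
                have hlt : j < (List.take (j + 1) (h0 :: t)).length := by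
                  rw [List.length_take]; omega
                have := List.getElem_take (xs := h0 :: t) (j := j + 1) (i := j) (h := hlt)
                rw [← this]
                exact List.getElem_mem hlt
              have hx0x : x0 ≠ x := by
                have := hhead h0 (by simp)
                rw [hh0] at this
                exact this
              have hcG : (r : Int) + (j : Int) - m = (((r - 1) : Nat) : Int) := by omega
              rw [hcG, PySem.List.pyGet?_natCast,
                  List.getElem?_append_left (by rw [List.length_replicate]; omega),
                  List.getElem?_replicate, if_pos (by omega)]
              intro hc
              have : x = (h0 :: t)[j] := by simpa using hc
              rw [hpj] at this
              exact hx0x this.symm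
          · rcases hbd with h | h
            · omega
            · refine Or.inr ?_
              intro hc
              apply h
              have hcG : (r : Int) + (j : Int) - m = (((r + (j - m.toNat)) : Nat) : Int) := by omega
              have hcL : (j : Int) - m = (((j - m.toNat) : Nat) : Int) := by omega
              rw [hcG, PySem.List.pyGet?_natCast,
                  List.getElem?_append_right (by rw [List.length_replicate]; omega),
                  List.length_replicate] at hc
              have heq : r + (j - m.toNat) - r = j - m.toNat := by omega
              rw [heq] at hc
              rw [hcL, PySem.List.pyGet?_natCast]
              exact hc
      · -- local guard fails; globally the window (if any) straddles the run border
        constructor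
        · rintro ⟨hg, hw, _⟩
          exfalso
          -- global window crosses the boundary between the run and rest
          have hgm : m ≤ (r : Int) + (j : Int) + 1 := hg
          have haG : (r : Int) + (j : Int) - m + 1 = (((r + j + 1 - m.toNat) : Nat) : Int) := by
            omega
          have hbG : (r : Int) + (j : Int) + 1 = (((r + j + 1) : Nat) : Int) := by omega
          rw [haG, hbG, sliceP] at hw
          have h1 : min ((r + j + 1) - (r + j + 1 - m.toNat)) (r - (r + j + 1 - m.toNat)) =
              m.toNat - j - 1 := by omega
          have h2 : ((r + j + 1) - (r + j + 1 - m.toNat)) - (r - (r + j + 1 - m.toNat)) = j + 1 := by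
            omega
          have h3 : (r + j + 1 - m.toNat) - r = 0 := by omega
          rw [h1, h2, h3, List.drop_zero] at hw
          obtain ⟨x0, _, hall⟩ := (setlen_one_iff _).mp hw
          cases rest with
          | nil => simp at hj
          | cons h0 t =>
            have hxx0 : x = x0 := by
              apply hall
              apply List.mem_append_left
              exact List.mem_replicate.mpr ⟨by omega, rfl⟩
            have hh0 : h0 = x0 := by
              apply hall
              apply List.mem_append_right
              simp [List.take_succ_cons]
            have := hhead h0 (by simp)
            rw [hh0, ← hxx0] at this
            exact this rfl
        · rintro ⟨hg, _, _⟩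
          exfalso
          omega
    · -- m ≤ 0: both windows are empty slices, so both conditions fail
      constructor
      · rintro ⟨_, hw, _⟩
        exfalso
        have ha : (r : Int) + (j : Int) - m + 1 = (((r + j + 1 + (-m).toNat) : Nat) : Int) := by
          omega
        have hb : (r : Int) + (j : Int) + 1 = (((r + j + 1) : Nat) : Int) := by omega
        rw [ha, hb, sliceP] at hw
        have h1 : min ((r + j + 1) - (r + j + 1 + (-m).toNat))
            (r - (r + j + 1 + (-m).toNat)) = 0 := by omega
        have h2 : ((r + j + 1) - (r + j + 1 + (-m).toNat)) -
            (r - (r + j + 1 + (-m).toNat)) = 0 := by omega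
        rw [h1, h2] at hw
        simp only [List.replicate_zero, List.take_zero, List.append_nil] at hw
        exact setlen_nil_ne_one hw
      · rintro ⟨_, hw, _⟩
        exfalso
        have ha : (j : Int) - m + 1 = (((j + 1 + (-m).toNat) : Nat) : Int) := by omega
        have hb : (j : Int) + 1 = (((j + 1) : Nat) : Int) := by omega
        rw [ha, hb, PySem.List.slice_natCast] at hw
        have h1 : (j + 1) - (j + 1 + (-m).toNat) = 0 := by omega
        rw [h1] at hw
        simp only [List.take_zero] at hw
        exact setlen_nil_ne_one hw
  unfold emitB
  by_cases h : BCond rest m ((j : Int)) rest[j]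
  · rw [if_pos (hiff.mpr h), if_pos h]
  · rw [if_neg (fun hc => h (hiff.mp hc)), if_neg h]

-- enumerate at a shifted start
theorem enumerate_shift (xs : List String) :
    ∀ (s t : Int), PySem.List.enumerate xs (s + t) =
      (PySem.List.enumerate xs s).map (fun q => (q.1 + t, q.2)) := by
  induction xs with
  | nil => intro s t; simp [PySem.List.enumerate]
  | cons x xs ih =>
    intro s t
    rw [PySem.List.enumerate_cons, PySem.List.enumerate_cons, List.map_cons]
    have : s + t + 1 = (s + 1) + t := by ring
    rw [this, ih]

-- the filterMap over the tail's enumeration, shifted past the run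
theorem filterMap_emitB_rest (x : String) (r : Nat) (hr : 1 ≤ r) (rest : List String)
    (hhead : ∀ h ∈ rest.head?, h ≠ x) (m : Int) :
    (PySem.List.enumerate rest ((r : Nat) : Int)).filterMap
        (emitB (List.replicate r x ++ rest) m) =
      (PySem.List.enumerate rest 0).filterMap (emitB rest m) := by
  have h0 : ((r : Nat) : Int) = 0 + ((r : Nat) : Int) := by ring
  rw [h0, enumerate_shift, List.filterMap_map]
  apply List.filterMap_congr
  intro q hq
  obtain ⟨k, hk, hq⟩ := (PySem.List.mem_enumerate_iff rest 0 q).mp hq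
  subst hq
  simp only [Function.comp_apply, zero_add]
  rw [show (k : Int) + (r : Int) = (r : Int) + (k : Int) by ring]
  exact emitB_shift x r hr rest hhead m k hk

-- the filterMap over the run's enumeration: one hit iff 1 ≤ min_stable ≤ run length
theorem filterMap_enum_simple (x : String) (m : Int) :
    ∀ (r : Nat) (s : Int),
    (PySem.List.enumerate (List.replicate r x) s).filterMap
        (fun ip => if ip.1 + 1 = m then some ip.2 else none) =
      if s + 1 ≤ m ∧ m ≤ s + (r : Int) then [x] else [] := by
  intro r
  induction r with
  | zero =>
    intro s
    rw [if_neg (by omega)]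
    rfl
  | succ r ih =>
    intro s
    rw [List.replicate_succ, PySem.List.enumerate_cons, List.filterMap_cons]
    by_cases h1 : s + 1 = m
    · rw [if_pos h1, ih (s + 1), if_neg (by omega), if_pos (by push_cast; omega)]
    · rw [if_neg h1, ih (s + 1)]
      by_cases h2 : s + 1 + 1 ≤ m ∧ m ≤ s + 1 + (r : Int)
      · rw [if_pos h2, if_pos (by push_cast; omega)]
      · rw [if_neg h2, if_neg (by push_cast; omega)]

theorem filterMap_emitB_rep (x : String) (r : Nat) (rest : List String) (m : Int) :
    (PySem.List.enumerate (List.replicate r x) 0).filterMap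
        (emitB (List.replicate r x ++ rest) m) =
      if 1 ≤ m ∧ m ≤ (r : Int) then [x] else [] := by
  have hcg : (PySem.List.enumerate (List.replicate r x) 0).filterMap
      (emitB (List.replicate r x ++ rest) m) =
      (PySem.List.enumerate (List.replicate r x) 0).filterMap
        (fun ip => if ip.1 + 1 = m then some ip.2 else none) := by
    apply List.filterMap_congr
    intro q hq
    obtain ⟨k, hk, hq⟩ := (PySem.List.mem_enumerate_iff _ 0 q).mp hq
    subst hq
    simp only [zero_add]
    rw [List.length_replicate] at hk
    rw [List.getElem_replicate]
    exact emitB_rep x r rest k hk m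
  rw [hcg, filterMap_enum_simple x m r 0]
  by_cases h : 1 ≤ m ∧ m ≤ (r : Int)
  · rw [if_pos (by omega), if_pos h]
  · rw [if_neg (by omega), if_neg h]

-- B splits along the leading run exactly like runsFilter does
theorem B_split (x : String) (xs : List String) (m : Int) :
    remove_noise_alt (x :: xs) m =
      (if 1 ≤ m ∧ m ≤ (((countRun x xs).1 + 1 : Nat) : Int) then [x] else []) ++
        remove_noise_alt (countRun x xs).2 m := by
  have hd := countRun_decomp x xs
  rw [alt_eq_filterMap, alt_eq_filterMap]
  rw [hd]
  rw [PySem.List.enumerate_append, List.filterMap_append]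
  rw [List.length_replicate]
  simp only [zero_add]
  rw [filterMap_emitB_rep x ((countRun x xs).1 + 1) (countRun x xs).2 m,
      filterMap_emitB_rest x ((countRun x xs).1 + 1) (by omega) (countRun x xs).2
        (countRun_head x xs) m]

theorem runsFilter_eq_alt (preds : List String) (m : Int) :
    runsFilter preds m = remove_noise_alt preds m := by
  induction preds using runs.induct with
  | case1 =>
    rw [alt_eq_filterMap]
    simp [runsFilter, runs, PySem.List.enumerate_nil]
  | case2 x xs p ih =>
    rw [B_split x xs m]
    simp only [runsFilter, runs, List.filterMap_cons]
    rw [← ih]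
    by_cases hc : 1 ≤ m ∧ m ≤ (((countRun x xs).1 + 1 : Nat) : Int)
    · rw [if_pos (by exact_mod_cast hc), if_pos (by exact_mod_cast hc)]
      rfl
    · rw [if_neg (by exact_mod_cast hc), if_neg (by exact_mod_cast hc)]
      rfl

-- ===== VERDICT (by name: the statement is the Claim_ definition above) =====
theorem remove_noise_spec : Claim_equal_remove_noise := by
  intro preds m _
  unfold Spec_remove_noise remove_noise
  rw [foldA_eq_append_gA m preds [] 0 none, List.nil_append, gA_eq_runsFilter,
      runsFilter_eq_alt]
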